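-- pv_equiv track=rewrite | github.com/HamoHamoHamo/Kingbus_ERP | dispatch/views.py | get_schedule_list_by_driver
-- ===== SOURCE A (Python) =====
-- def get_schedule_list_by_driver(timeline, daily_connect_list, driver_list):
--     connect_dict = {}
--     for connect in daily_connect_list:
--         driver = connect['driver_id__id']
--         if driver not in connect_dict:
--             connect_dict[driver] = []
--         connect_dict[driver].append(connect)
--     return connect_dict
-- ===== SOURCE B (Python) =====
-- def get_schedule_list_by_driver(timeline, daily_connect_list, driver_list):
--     order = list(dict.fromkeys(c['driver_id__id'] for c in daily_connect_list))
--     return {d: [c for c in daily_connect_list if c['driver_id__id'] == d]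
--             for d in order}
-- ===== Notes on version B (the rewrite author's own statement) =====
-- stated objective: alternative
-- what changed: Replaces the streaming dict accumulation (membership test + in-place append per record) with a two-pass grouping: first collect the distinct driver ids in first-occurrence order, then build each group by filtering the record list per driver.
import Mathlib
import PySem

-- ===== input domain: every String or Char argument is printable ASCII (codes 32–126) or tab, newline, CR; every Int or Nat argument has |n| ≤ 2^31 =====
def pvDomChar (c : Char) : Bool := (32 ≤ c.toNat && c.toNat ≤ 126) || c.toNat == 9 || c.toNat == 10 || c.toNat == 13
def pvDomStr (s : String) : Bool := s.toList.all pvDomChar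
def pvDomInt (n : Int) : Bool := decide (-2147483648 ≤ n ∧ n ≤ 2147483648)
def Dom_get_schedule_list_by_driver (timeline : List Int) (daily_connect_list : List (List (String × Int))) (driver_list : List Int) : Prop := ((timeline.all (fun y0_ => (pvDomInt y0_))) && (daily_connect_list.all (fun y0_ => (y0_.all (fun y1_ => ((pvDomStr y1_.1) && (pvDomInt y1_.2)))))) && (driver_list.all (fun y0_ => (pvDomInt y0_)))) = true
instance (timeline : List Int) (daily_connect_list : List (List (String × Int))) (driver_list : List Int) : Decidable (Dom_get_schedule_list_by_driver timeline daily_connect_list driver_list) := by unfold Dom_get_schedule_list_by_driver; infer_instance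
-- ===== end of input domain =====

-- B groups the records in two passes (distinct driver ids in first-occurrence order, then one filter
-- per driver) instead of A's one-pass dict accumulation; equal output, alternative decomposition.

-- connect['driver_id__id'] (shared by both ports; Pre_ guarantees the key is present, so getD's
-- default is never the value used)
def pvDriverKey (connect : List (String × Int)) : Int :=
  (PySem.Dict.mk connect).getD "driver_id__id" 0

-- ===== PORT A =====
def get_schedule_list_by_driver (timeline : List Int) (daily_connect_list : List (List (String × Int))) (driver_list : List Int) : List (Int × List (List (String × Int))) :=
  (daily_connect_list.foldl
    (fun connect_dict connect =>
      let driver := pvDriverKey connect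
      let connect_dict :=
        if connect_dict.contains driver = false then connect_dict.insert driver []
        else connect_dict
      connect_dict.modify driver [] (fun l => l ++ [connect]))
    PySem.Dict.empty).items

-- ===== PORT B =====
def get_schedule_list_by_driver_alt (timeline : List Int) (daily_connect_list : List (List (String × Int))) (driver_list : List Int) : List (Int × List (List (String × Int))) :=
  let order := PySem.List.dedup (daily_connect_list.map pvDriverKey)
  order.map (fun d => (d, daily_connect_list.filter (fun c => pvDriverKey c == d)))

-- ===== PRECONDITION & SPEC =====
-- Pre_ excludes exactly the inputs where some record lacks the 'driver_id__id' key, on which the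
-- Python A raises KeyError.
def Pre_get_schedule_list_by_driver (timeline : List Int) (daily_connect_list : List (List (String × Int))) (driver_list : List Int) : Prop :=
  ∀ connect ∈ daily_connect_list, (PySem.Dict.mk connect).contains "driver_id__id" = true
instance (timeline : List Int) (daily_connect_list : List (List (String × Int))) (driver_list : List Int) : Decidable (Pre_get_schedule_list_by_driver timeline daily_connect_list driver_list) := by unfold Pre_get_schedule_list_by_driver; infer_instance

def pvWitness_get_schedule_list_by_driver : List Int × (List (List (String × Int))) × List Int :=
  ([5], [[("driver_id__id", 1), ("x", 7)], [("driver_id__id", 2)], [("driver_id__id", 1), ("x", 9)]], [1, 2])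

def Spec_get_schedule_list_by_driver (timeline : List Int) (daily_connect_list : List (List (String × Int))) (driver_list : List Int) (out : List (Int × List (List (String × Int)))) : Prop := out = get_schedule_list_by_driver_alt timeline daily_connect_list driver_list
instance (timeline : List Int) (daily_connect_list : List (List (String × Int))) (driver_list : List Int) (out : List (Int × List (List (String × Int)))) : Decidable (Spec_get_schedule_list_by_driver timeline daily_connect_list driver_list out) := by unfold Spec_get_schedule_list_by_driver; infer_instance

-- ===== CLAIM (what is proved, stated in full; the proofs are below) =====
def Claim_equal_get_schedule_list_by_driver : Prop := ∀ (timeline : List Int) (daily_connect_list : List (List (String × Int))) (driver_list : List Int), Dom_get_schedule_list_by_driver timeline daily_connect_list driver_list → Pre_get_schedule_list_by_driver timeline daily_connect_list driver_list → Spec_get_schedule_list_by_driver timeline daily_connect_list driver_list (get_schedule_list_by_driver timeline daily_connect_list driver_list)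

-- ===== LEMMAS AND PROOFS =====

-- A's loop body ('setdefault to [] then append') is one Dict.modify
theorem pvStep_eq_modify (d : PySem.Dict Int (List (List (String × Int)))) (k : Int)
    (c : List (String × Int)) :
    (if d.contains k = false then d.insert k [] else d).modify k [] (fun l => l ++ [c])
      = d.modify k [] (fun l => l ++ [c]) := by
  by_cases h : d.contains k = false
  · simp only [h, if_pos]
    simp [PySem.Dict.modify, PySem.Dict.getD_insert_self, PySem.Dict.insert_insert_self,
      PySem.Dict.getD_of_not_contains d [] h]
  · simp [h]

theorem pvFoldA_eq (l : List (List (String × Int))) :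
    (l.foldl
      (fun connect_dict connect =>
        let driver := pvDriverKey connect
        let connect_dict :=
          if connect_dict.contains driver = false then connect_dict.insert driver []
          else connect_dict
        connect_dict.modify driver [] (fun t => t ++ [connect]))
      PySem.Dict.empty)
    = l.foldl (fun d c => d.modify (pvDriverKey c) [] (fun t => t ++ [c])) PySem.Dict.empty := by
  apply PySem.List.foldl_congr_mem
  intro d c _
  exact pvStep_eq_modify d (pvDriverKey c) c

theorem pvFoldA_getD (l : List (List (String × Int))) (k : Int) :
    (l.foldl (fun d c => d.modify (pvDriverKey c) [] (fun t => t ++ [c]))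
        PySem.Dict.empty).getD k []
      = l.filter (fun c => pvDriverKey c == k) := by
  have h := PySem.Dict.getD_foldl_modify_append (l.map (fun c => (pvDriverKey c, c)))
    (PySem.Dict.empty) k
  rw [List.foldl_map] at h
  rw [h]
  simp only [PySem.Dict.getD_empty, List.nil_append, List.filter_map, List.map_map]
  simp [Function.comp_def]

theorem pvFoldA_keys (l : List (List (String × Int))) :
    (l.foldl (fun d c => d.modify (pvDriverKey c) [] (fun t => t ++ [c]))
        PySem.Dict.empty).keys
      = PySem.List.dedup (l.map pvDriverKey) := by
  rw [PySem.Dict.keys_foldl_modify_key l pvDriverKey [] (fun _ c t => t ++ [c])]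
  simp [PySem.Dict.keys_empty, PySem.Set.update_nil_left, PySem.List.dedup_eq_ofList]

-- ===== VERDICT (by name: the statement is the Claim_ definition above) =====
theorem get_schedule_list_by_driver_spec : Claim_equal_get_schedule_list_by_driver := by
  intro timeline dcl driver_list _ _
  unfold Spec_get_schedule_list_by_driver get_schedule_list_by_driver get_schedule_list_by_driver_alt
  rw [pvFoldA_eq]
  set D := dcl.foldl (fun d c => d.modify (pvDriverKey c) [] (fun t => t ++ [c])) PySem.Dict.empty with hD
  have hnd : D.keys.Nodup := by
    rw [hD]
    exact PySem.Dict.nodup_keys_foldl_modify_key dcl pvDriverKey [] (fun _ c t => t ++ [c])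
      PySem.Dict.empty (by simp [PySem.Dict.keys_empty])
  rw [PySem.Dict.items_eq_map_keys D hnd []]
  rw [hD, pvFoldA_keys]
  apply List.map_congr_left
  intro k _
  rw [← hD, pvFoldA_getD]
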